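-- pv_equiv track=rewrite | github.com/nestauk/discovery_generative_ai | src/scraping/start_for_life/scrape_startforlife.py | merge_sections_based_on_headers
-- ===== SOURCE A (Python) =====
-- from typing import List
--
-- def merge_sections_based_on_headers(headers: List[str], sections: List[str]) -> (List[str], List[str], List[int]):
--     """
--     Merge sections based on headers, where sections without headers will be merged in the previous section that has a header
--
--     Args:
--         headers
--             List of headers
--
--         sections
--             List of sections
--
--     Returns:
--         Tuple of lists with headers, merged sections and removed indices
--     """
--     new_headers = []
--     new_sections = []
--     # Keep track of removed indices
--     removed_indices = []
--     # Keep track of the last non-empty header index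
--     last_non_empty_index = -1
--
--     for i in range(len(headers)):
--         # If header is non-empty
--         if headers[i]:
--             new_headers.append(headers[i])
--             new_sections.append(sections[i])
--             last_non_empty_index = len(new_headers) - 1
--         # If header is empty
--         else:
--             # Add index to removed list
--             removed_indices.append(i)
--             # If there was a previous non-empty header
--             if last_non_empty_index != -1:
--                 new_sections[last_non_empty_index] += sections[i]
--
--     return new_headers, new_sections, removed_indices
-- ===== SOURCE B (Python) =====
-- from typing import List
--
-- def merge_sections_based_on_headers(headers: List[str], sections: List[str]) -> (List[str], List[str], List[int]):
--     # Staged approach: find the positions of the headed groups first, then build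
--     # each merged section as the join of a contiguous slice of `sections`.
--     removed_indices = [i for i, h in enumerate(headers) if not h]
--     headed = [(i, h) for i, h in enumerate(headers) if h]
--     new_headers = [h for _, h in headed]
--     bounds = [i for i, _ in headed] + [len(headers)]
--     new_sections = ["".join(sections[a:b]) for a, b in zip(bounds, bounds[1:])]
--     return new_headers, new_sections, removed_indices
-- ===== Notes on version B (the rewrite author's own statement) =====
-- stated objective: alternative
-- what changed: Replaces A's single stateful pass (mutating new_sections in place through last_non_empty_index) by a staged computation: first locate the headed positions with enumerate-comprehensions, then emit each merged section as ''.join of one contiguous slice sections[a:b] between adjacent headed positions.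
import Mathlib
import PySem

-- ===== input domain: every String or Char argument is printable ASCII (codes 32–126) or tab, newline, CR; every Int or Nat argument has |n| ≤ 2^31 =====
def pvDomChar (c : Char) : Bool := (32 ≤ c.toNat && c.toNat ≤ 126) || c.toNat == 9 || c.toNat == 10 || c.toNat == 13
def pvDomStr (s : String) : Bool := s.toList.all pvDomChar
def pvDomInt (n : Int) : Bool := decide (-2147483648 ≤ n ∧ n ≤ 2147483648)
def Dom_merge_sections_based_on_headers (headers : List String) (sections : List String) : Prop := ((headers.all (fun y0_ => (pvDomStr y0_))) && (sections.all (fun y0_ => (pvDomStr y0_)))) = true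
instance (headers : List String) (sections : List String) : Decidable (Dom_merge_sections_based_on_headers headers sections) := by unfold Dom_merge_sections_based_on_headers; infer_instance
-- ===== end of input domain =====

-- B replaces A's single stateful pass (in-place += into new_sections via last_non_empty_index)
-- by a staged computation: locate the headed positions first, then build each merged section
-- as the join of one contiguous slice of `sections` (alternative decomposition, same cost).

-- ===== PORT A =====
-- A's `for i in range(len(headers))` walks the two lists in step: ported as the obvious
-- structural recursion on the headers suffix, carrying the aligned sections suffix and the
-- running index i.  `sections[i]` is the head of that suffix (exact whenever Python does not
-- raise an IndexError, i.e. on Pre_; headD "" is a junk default outside it).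
-- `new_sections[last] += sections[i]` is ported as List.modify at last.toNat (last ≥ 0 there).
def pvAloop (hs ss : List String) (i : Int)
    (st : List String × List String × List Int × Int) :
    List String × List String × List Int × Int :=
  match hs, st with
  | [], st => st
  | h :: hs', (nh, ns, rem, last) =>
      if h ≠ "" then
        pvAloop hs' ss.tail (i + 1)
          (nh ++ [h], ns ++ [ss.headD ""], rem, ((nh ++ [h]).length : Int) - 1)
      else
        if last ≠ -1 then
          pvAloop hs' ss.tail (i + 1)
            (nh, ns.modify last.toNat (fun v => v ++ ss.headD ""), rem ++ [i], last)
        else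
          pvAloop hs' ss.tail (i + 1) (nh, ns, rem ++ [i], last)

def merge_sections_based_on_headers (headers : List String) (sections : List String) :
    List String × List String × List Int :=
  let st := pvAloop headers sections 0 ([], [], [], -1)
  (st.1, st.2.1, st.2.2.1)

-- ===== PORT B =====
-- Source B line for line: the two enumerate-comprehensions, the bounds list, and the
-- zip-of-adjacent-bounds building each merged section as "".join(sections[a:b]).
def merge_sections_based_on_headers_alt (headers : List String) (sections : List String) :
    List String × List String × List Int :=
  let enum := PySem.List.enumerate headers 0
  let removed_indices := (enum.filter (fun p => p.2 == "")).map (fun p => p.1)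
  let headed := enum.filter (fun p => p.2 != "")
  let new_headers := headed.map (fun p => p.2)
  let bounds := headed.map (fun p => p.1) ++ [(headers.length : Int)]
  let new_sections := (bounds.zip bounds.tail).map
      (fun ab => PySem.Str.join "" (PySem.List.slice sections (some ab.1) (some ab.2)))
  (new_headers, new_sections, removed_indices)

-- ===== PRECONDITION & SPEC =====
-- Pre_ excludes exactly the inputs where Python A raises IndexError (sections shorter than
-- headers while some header is non-empty).
def Pre_merge_sections_based_on_headers (headers : List String) (sections : List String) : Prop :=
  headers.length ≤ sections.length ∨ headers.all (fun h => h == "") = true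
instance (headers : List String) (sections : List String) :
    Decidable (Pre_merge_sections_based_on_headers headers sections) := by
  unfold Pre_merge_sections_based_on_headers; infer_instance

def pvWitness_merge_sections_based_on_headers : List String × List String :=
  (["H", "", "K"], ["a", "b", "c"])

def Spec_merge_sections_based_on_headers (headers : List String) (sections : List String)
    (out : List String × List String × List Int) : Prop :=
  out = merge_sections_based_on_headers_alt headers sections
instance (headers : List String) (sections : List String)
    (out : List String × List String × List Int) :
    Decidable (Spec_merge_sections_based_on_headers headers sections out) := by
  unfold Spec_merge_sections_based_on_headers; infer_instance

-- ===== CLAIM =====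
def Claim_equal_merge_sections_based_on_headers : Prop :=
  ∀ (headers : List String) (sections : List String),
    Dom_merge_sections_based_on_headers headers sections →
    Pre_merge_sections_based_on_headers headers sections →
    Spec_merge_sections_based_on_headers headers sections
      (merge_sections_based_on_headers headers sections)

-- ===== LEMMAS AND PROOFS =====

-- number of leading empty headers = index of the first non-empty header
def pvCntE (hs : List String) : Nat := (hs.takeWhile (fun h => h == "")).length

-- concatenation of the first n sections
def pvCat (ss : List String) (n : Nat) : String := PySem.Str.join "" (ss.take n)

-- common recursive skeleton both ports are reduced to
def pvBcore : List String → List String → Int → List String × List String × List Int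
  | [], _, _ => ([], [], [])
  | h :: hs, ss, i =>
    let r := pvBcore hs ss.tail (i + 1)
    if h = "" then (r.1, r.2.1, i :: r.2.2)
    else (h :: r.1, pvCat ss (pvCntE hs + 1) :: r.2.1, r.2.2)

def pvHeaded (hs : List String) (i : Int) : List (Int × String) :=
  (PySem.List.enumerate hs i).filter (fun p => p.2 != "")

def pvBounds (hs : List String) (i : Int) : List Int :=
  (pvHeaded hs i).map (fun p => p.1) ++ [i + (hs.length : Int)]

def pvSecs (hs ss : List String) (i : Int) : List String :=
  ((pvBounds hs i).zip (pvBounds hs i).tail).map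
    (fun ab => PySem.Str.join "" (PySem.List.slice ss (some (ab.1 - i)) (some (ab.2 - i))))

theorem pvJoin_cons (x : String) (L : List String) :
    PySem.Str.join "" (x :: L) = x ++ PySem.Str.join "" L := by
  apply String.toList_inj.mp
  rw [String.toList_append, PySem.Str.toList_join, PySem.Str.toList_join]
  cases L with
  | nil => simp [PySem.Chars.join_singleton, PySem.Chars.join_nil]
  | cons y L => simp [PySem.Chars.join_cons_cons]

theorem pvCat_zero (ss : List String) : pvCat ss 0 = "" := by
  apply String.toList_inj.mp
  simp [pvCat, PySem.Str.toList_join, PySem.Chars.join_nil]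

theorem pvCat_succ (ss : List String) (n : Nat) :
    pvCat ss (n + 1) = ss.headD "" ++ pvCat ss.tail n := by
  cases ss with
  | nil => simp [pvCat]
  | cons x xs => simp [pvCat, List.take_succ_cons, pvJoin_cons]

theorem pvModify_append_last (xs : List String) (x : String) (f : String → String) :
    (xs ++ [x]).modify xs.length f = xs ++ [f x] := by
  induction xs with
  | nil => simp [List.modify]
  | cons a as ih => simpa [List.modify] using ih

theorem pvCntE_cons_empty (hs : List String) : pvCntE ("" :: hs) = pvCntE hs + 1 := by
  simp [pvCntE]

theorem pvCntE_cons_ne (h : String) (hs : List String) (hne : h ≠ "") :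
    pvCntE (h :: hs) = 0 := by
  simp [pvCntE, hne]

theorem pvHeaded_cons_empty (hs : List String) (i : Int) :
    pvHeaded ("" :: hs) i = pvHeaded hs (i + 1) := by
  simp [pvHeaded, PySem.List.enumerate_cons]

theorem pvHeaded_cons_ne (h : String) (hs : List String) (i : Int) (hne : h ≠ "") :
    pvHeaded (h :: hs) i = (i, h) :: pvHeaded hs (i + 1) := by
  simp [pvHeaded, PySem.List.enumerate_cons, hne]

theorem pvBounds_cons_empty (hs : List String) (i : Int) :
    pvBounds ("" :: hs) i = pvBounds hs (i + 1) := by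
  have e : i + (((hs.length : Int)) + 1) = (i + 1) + (hs.length : Int) := by ring
  simp [pvBounds, pvHeaded_cons_empty, e]

theorem pvBounds_cons_ne (h : String) (hs : List String) (i : Int) (hne : h ≠ "") :
    pvBounds (h :: hs) i = i :: pvBounds hs (i + 1) := by
  have e : i + (((hs.length : Int)) + 1) = (i + 1) + (hs.length : Int) := by ring
  simp [pvBounds, pvHeaded_cons_ne h hs i hne, e]

theorem pvBounds_ge (hs : List String) : ∀ (i : Int) (x : Int), x ∈ pvBounds hs i → i ≤ x := by
  induction hs with
  | nil =>
      intro i x hx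
      simp [pvBounds, pvHeaded, PySem.List.enumerate] at hx
      omega
  | cons h hs ih =>
      intro i x hx
      by_cases hne : h = ""
      · subst hne
        rw [pvBounds_cons_empty] at hx
        have := ih (i + 1) x hx; omega
      · rw [pvBounds_cons_ne h hs i hne] at hx
        rcases List.mem_cons.mp hx with rfl | hx
        · omega
        · have := ih (i + 1) x hx; omega

theorem pvBounds_eq_cons (hs : List String) : ∀ (i : Int),
    ∃ t, pvBounds hs i = (i + (pvCntE hs : Int)) :: t := by
  induction hs with
  | nil => intro i; exact ⟨[], by simp [pvBounds, pvHeaded, pvCntE, PySem.List.enumerate]⟩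
  | cons h hs ih =>
      intro i
      by_cases hne : h = ""
      · subst hne
        obtain ⟨t, ht⟩ := ih (i + 1)
        refine ⟨t, ?_⟩
        rw [pvBounds_cons_empty, ht, pvCntE_cons_empty]
        congr 1
        push_cast
        ring
      · refine ⟨pvBounds hs (i + 1), ?_⟩
        rw [pvBounds_cons_ne h hs i hne, pvCntE_cons_ne h hs hne]
        simp

theorem pvSlice_shift (x : String) (ss : List String) (a b : Int) (ha : 1 ≤ a) (hb : 1 ≤ b) :
    PySem.List.slice (x :: ss) (some a) (some b) =
    PySem.List.slice ss (some (a - 1)) (some (b - 1)) := by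
  rw [PySem.List.slice_toNat _ (by omega) (by omega),
      PySem.List.slice_toNat _ (by omega) (by omega)]
  obtain ⟨k, hk⟩ : ∃ k, a.toNat = k + 1 := ⟨a.toNat - 1, by omega⟩
  have h1 : (a - 1).toNat = k := by omega
  have h2 : (b - 1).toNat - k = b.toNat - (k + 1) := by omega
  rw [hk, h1, h2, List.drop_succ_cons]

-- shifting a slice-building map from the full section list to its tail
theorem pvMap_shift (ss : List String) (i : Int) (l : List (Int × Int))
    (hge : ∀ ab ∈ l, i + 1 ≤ ab.1 ∧ i + 1 ≤ ab.2) :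
    l.map (fun ab => PySem.Str.join ""
        (PySem.List.slice ss (some (ab.1 - i)) (some (ab.2 - i)))) =
    l.map (fun ab => PySem.Str.join ""
        (PySem.List.slice ss.tail (some (ab.1 - (i + 1))) (some (ab.2 - (i + 1))))) := by
  apply List.map_congr_left
  intro ab hab
  obtain ⟨h1, h2⟩ := hge ab hab
  cases ss with
  | nil =>
      rw [PySem.List.slice_toNat _ (by omega) (by omega),
          PySem.List.slice_toNat _ (by omega) (by omega)]
      simp
  | cons x xs =>
      rw [pvSlice_shift x xs _ _ (by omega) (by omega)]
      have e1 : ab.1 - i - 1 = ab.1 - (i + 1) := by ring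
      have e2 : ab.2 - i - 1 = ab.2 - (i + 1) := by ring
      rw [e1, e2]
      rfl

theorem pvZip_bounds_ge (hs : List String) (i : Int) (ab : Int × Int)
    (hab : ab ∈ (pvBounds hs i).zip (pvBounds hs i).tail) :
    i ≤ ab.1 ∧ i ≤ ab.2 := by
  have hm := List.of_mem_zip hab
  exact ⟨pvBounds_ge hs i ab.1 hm.1, pvBounds_ge hs i ab.2 (List.mem_of_mem_tail hm.2)⟩

theorem pvSecs_cons_empty (hs ss : List String) (i : Int) :
    pvSecs ("" :: hs) ss i = pvSecs hs ss.tail (i + 1) := by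
  unfold pvSecs
  rw [pvBounds_cons_empty]
  exact pvMap_shift ss i _ (fun ab hab => pvZip_bounds_ge hs (i + 1) ab hab)

theorem pvSecs_cons_ne (h : String) (hs ss : List String) (i : Int) (hne : h ≠ "") :
    pvSecs (h :: hs) ss i = pvCat ss (pvCntE hs + 1) :: pvSecs hs ss.tail (i + 1) := by
  unfold pvSecs
  rw [pvBounds_cons_ne h hs i hne]
  obtain ⟨t, ht⟩ := pvBounds_eq_cons hs (i + 1)
  rw [ht]
  simp only [List.tail_cons, List.zip_cons_cons, List.map_cons]
  congr 1
  · show PySem.Str.join ""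
        (PySem.List.slice ss (some (i - i)) (some (i + 1 + (pvCntE hs : Int) - i))) = _
    have e0 : i - i = (0 : Int) := by ring
    have e1 : i + 1 + (pvCntE hs : Int) - i = ((pvCntE hs + 1 : Nat) : Int) := by
      push_cast; ring
    rw [e0, e1, PySem.List.slice_zero_start, PySem.List.slice_to_natCast]
    rfl
  · have hz : List.zip ((i + 1 + (pvCntE hs : Int)) :: t) t =
        (pvBounds hs (i + 1)).zip (pvBounds hs (i + 1)).tail := by
      rw [ht, List.tail_cons]
    rw [hz]
    exact pvMap_shift ss i _ (fun ab hab => pvZip_bounds_ge hs (i + 1) ab hab)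

theorem pvBcore_secs (hs : List String) : ∀ (ss : List String) (i : Int),
    (pvBcore hs ss i).2.1 = pvSecs hs ss i := by
  induction hs with
  | nil =>
      intro ss i
      simp [pvBcore, pvSecs, pvBounds, pvHeaded, PySem.List.enumerate]
  | cons h hs ih =>
      intro ss i
      by_cases hne : h = ""
      · subst hne
        simp only [pvBcore, if_true]
        rw [pvSecs_cons_empty]
        exact ih ss.tail (i + 1)
      · simp only [pvBcore]
        rw [if_neg hne, pvSecs_cons_ne h hs ss i hne, ih ss.tail (i + 1)]

theorem pvBcore_fst (hs : List String) : ∀ (ss : List String) (i : Int),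
    (pvBcore hs ss i).1 = hs.filter (fun h => h != "") := by
  induction hs with
  | nil => intro ss i; simp [pvBcore]
  | cons h hs ih =>
      intro ss i
      by_cases hne : h = ""
      · subst hne; simp [pvBcore, ih ss.tail (i + 1)]
      · simp [pvBcore, hne, ih ss.tail (i + 1)]

theorem pvBcore_rem (hs : List String) : ∀ (ss : List String) (i : Int),
    (pvBcore hs ss i).2.2 =
      ((PySem.List.enumerate hs i).filter (fun p => p.2 == "")).map (fun p => p.1) := by
  induction hs with
  | nil => intro ss i; simp [pvBcore, PySem.List.enumerate]
  | cons h hs ih =>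
      intro ss i
      by_cases hne : h = ""
      · subst hne
        simp [pvBcore, PySem.List.enumerate_cons, ih ss.tail (i + 1)]
      · simp [pvBcore, hne, PySem.List.enumerate_cons, ih ss.tail (i + 1)]

theorem pvHeaded_map_snd (hs : List String) : ∀ (i : Int),
    (pvHeaded hs i).map (fun p => p.2) = hs.filter (fun h => h != "") := by
  induction hs with
  | nil => intro i; simp [pvHeaded, PySem.List.enumerate]
  | cons h hs ih =>
      intro i
      by_cases hne : h = ""
      · subst hne; simp [pvHeaded_cons_empty, ih (i + 1)]
      · rw [pvHeaded_cons_ne h hs i hne]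
        simp [hne, ih (i + 1)]

theorem pvAlt_eq (headers sections : List String) :
    merge_sections_based_on_headers_alt headers sections = pvBcore headers sections 0 := by
  refine Prod.ext ?_ (Prod.ext ?_ ?_)
  · show ((PySem.List.enumerate headers 0).filter (fun p => p.2 != "")).map (fun p => p.2) =
      (pvBcore headers sections 0).1
    rw [pvBcore_fst, ← pvHeaded_map_snd headers 0]
    rfl
  · show ((((PySem.List.enumerate headers 0).filter (fun p => p.2 != "")).map (fun p => p.1)
        ++ [(headers.length : Int)]).zip
        ((((PySem.List.enumerate headers 0).filter (fun p => p.2 != "")).map (fun p => p.1)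
        ++ [(headers.length : Int)])).tail).map
        (fun ab => PySem.Str.join "" (PySem.List.slice sections (some ab.1) (some ab.2))) =
      (pvBcore headers sections 0).2.1
    rw [pvBcore_secs]
    unfold pvSecs pvBounds pvHeaded
    simp only [zero_add, sub_zero]
  · show ((PySem.List.enumerate headers 0).filter (fun p => p.2 == "")).map (fun p => p.1) =
      (pvBcore headers sections 0).2.2
    rw [pvBcore_rem]

theorem pvALoop_open (hs : List String) : ∀ (ss : List String) (i : Int)
    (nh ns : List String) (rem : List Int) (ch cs : String),
    nh.length = ns.length →
    ((pvAloop hs ss i (nh ++ [ch], ns ++ [cs], rem, (ns.length : Int))).1,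
     (pvAloop hs ss i (nh ++ [ch], ns ++ [cs], rem, (ns.length : Int))).2.1,
     (pvAloop hs ss i (nh ++ [ch], ns ++ [cs], rem, (ns.length : Int))).2.2.1) =
    (nh ++ ch :: (pvBcore hs ss i).1,
     ns ++ (cs ++ pvCat ss (pvCntE hs)) :: (pvBcore hs ss i).2.1,
     rem ++ (pvBcore hs ss i).2.2) := by
  induction hs with
  | nil =>
      intro ss i nh ns rem ch cs hlen
      simp [pvAloop, pvBcore, pvCntE, pvCat_zero]
  | cons h hs' ih =>
      intro ss i nh ns rem ch cs hlen
      by_cases hne : h = ""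
      · subst hne
        have hlast : ((ns.length : Int) ≠ -1) := by omega
        have htn : ((ns.length : Int)).toNat = ns.length := by omega
        simp only [pvAloop, ne_eq, not_true_eq_false, if_false, hlast, not_false_eq_true,
          if_true, htn]
        rw [pvModify_append_last ns cs (fun v => v ++ ss.headD "")]
        rw [ih ss.tail (i + 1) nh ns (rem ++ [i]) ch (cs ++ ss.headD "") hlen]
        simp [pvBcore, pvCntE_cons_empty, pvCat_succ, String.append_assoc]
      · simp only [pvAloop, if_pos (show h ≠ "" from hne)]
        have e2 : (((nh ++ [ch]) ++ [h]).length : Int) - 1 = (((ns ++ [cs]).length : Int)) := by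
          simp [hlen]
          omega
        rw [e2]
        rw [ih ss.tail (i + 1) (nh ++ [ch]) (ns ++ [cs]) rem h (ss.headD "")
          (by simp [hlen])]
        simp [pvBcore, hne, pvCntE_cons_ne h hs' hne, pvCat_zero, pvCat_succ]

theorem pvALoop_closed (hs : List String) : ∀ (ss : List String) (i : Int) (rem : List Int),
    ((pvAloop hs ss i ([], [], rem, -1)).1,
     (pvAloop hs ss i ([], [], rem, -1)).2.1,
     (pvAloop hs ss i ([], [], rem, -1)).2.2.1) =
    ((pvBcore hs ss i).1, (pvBcore hs ss i).2.1, rem ++ (pvBcore hs ss i).2.2) := by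
  induction hs with
  | nil => intro ss i rem; simp [pvAloop, pvBcore]
  | cons h hs' ih =>
      intro ss i rem
      by_cases hne : h = ""
      · subst hne
        simp only [pvAloop, ne_eq, not_true_eq_false, if_false]
        rw [ih ss.tail (i + 1) (rem ++ [i])]
        simp [pvBcore]
      · simp only [pvAloop, if_pos (show h ≠ "" from hne), List.nil_append]
        have e : ((([h] : List String)).length : Int) - 1 = (0 : Int) := by simp
        rw [e]
        have hopen := pvALoop_open hs' ss.tail (i + 1) [] [] rem h (ss.headD "") rfl
        simp only [List.nil_append, List.length_nil, Nat.cast_zero] at hopen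
        rw [hopen]
        simp [pvBcore, hne, pvCat_succ]

-- ===== VERDICT =====
theorem merge_sections_based_on_headers_spec : Claim_equal_merge_sections_based_on_headers := by
  intro headers sections _ _
  show merge_sections_based_on_headers headers sections =
    merge_sections_based_on_headers_alt headers sections
  rw [pvAlt_eq]
  show ((pvAloop headers sections 0 ([], [], [], -1)).1,
      (pvAloop headers sections 0 ([], [], [], -1)).2.1,
      (pvAloop headers sections 0 ([], [], [], -1)).2.2.1) = pvBcore headers sections 0
  have hc := pvALoop_closed headers sections 0 []
  simp only [List.nil_append] at hc
  rw [hc]
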